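-- pv_equiv track=rewrite | github.com/BayesianBoi/cds-language | assignments/assignment 1/src/utils.py | process_entities
-- ===== SOURCE A (Python) =====
-- import string
--
-- def process_entities(entities):
--     """
--     Processes the entities to remove punctuation and lowercases them. Used for later in the NLP pipeline for identifying the uniqiue entities in the text
--     """
--     processed_entities = []  # making a list to store the processed entities in
--     punc = string.punctuation  # getting the list of punc chars from the string package
--     for text, label in entities:  # as this is for post-processing after spacy has located the entities, it is important that we keep the labels for the entities
--         text = text.lower()  # lowercases everything
--         for char in punc:  # loop through each character in the texts and removes the defined list of symbols from the texts
--             text = text.replace(char, "")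
--         processed_entities.append((text, label))  # saves the processed entity and the entity label
--     return processed_entities
-- ===== SOURCE B (Python) =====
-- import string
--
-- def process_entities(entities):
--     """
--     Processes the entities to remove punctuation and lowercases them.
--     Single filtering pass over each text's characters instead of one
--     replace-pass per punctuation character.
--     """
--     punc = set(string.punctuation)
--     return [("".join(c for c in text.lower() if c not in punc), label)
--             for text, label in entities]
-- ===== Notes on version B (the rewrite author's own statement) =====
-- stated objective: idiomatic
-- what changed: Instead of looping over all 32 punctuation characters and rebuilding the text with str.replace for each, B makes a single filtering pass over the lowercased text's characters, keeping those not in a punctuation set, and builds the result list by comprehension.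
import Mathlib
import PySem

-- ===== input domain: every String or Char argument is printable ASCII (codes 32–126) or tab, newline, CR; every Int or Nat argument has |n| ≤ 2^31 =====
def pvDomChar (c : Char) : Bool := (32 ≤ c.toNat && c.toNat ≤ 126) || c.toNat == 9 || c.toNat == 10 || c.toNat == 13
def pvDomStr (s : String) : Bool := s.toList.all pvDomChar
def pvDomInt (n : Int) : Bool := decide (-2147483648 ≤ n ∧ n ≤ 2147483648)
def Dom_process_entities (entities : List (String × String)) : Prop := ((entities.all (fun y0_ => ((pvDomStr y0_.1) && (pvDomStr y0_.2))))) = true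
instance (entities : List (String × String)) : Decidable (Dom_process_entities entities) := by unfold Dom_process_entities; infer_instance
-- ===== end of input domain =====

-- B replaces A's 32 replace-passes per text with one character-filtering pass (idiomatic rewrite; return value proved identical on all inputs).


-- ===== PORT A =====
-- string.punctuation
def puncString : String := "!\"#$%&'()*+,-./:;<=>?@[\\]^_`{|}~"

def process_entities (entities : List (String × String)) : List (String × String) :=
  -- processed_entities = []; for text, label in entities: text = text.lower();
  -- for char in punc: text = text.replace(char, ""); processed_entities.append((text, label))
  entities.foldl
    (fun processed p =>
      let text := PySem.Str.lower p.1
      let text := puncString.toList.foldl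
        (fun t ch => PySem.Str.replace t (String.ofList [ch]) "") text
      processed ++ [(text, p.2)])
    []

-- ===== PORT B =====
def puncSet : PySem.Set Char := PySem.Set.ofList puncString.toList

def process_entities_alt (entities : List (String × String)) : List (String × String) :=
  -- [("".join(c for c in text.lower() if c not in punc), label) for text, label in entities]
  entities.map
    (fun p =>
      (String.ofList ((PySem.Str.lower p.1).toList.filter (fun c => !puncSet.contains c)), p.2))

-- ===== PRECONDITION & SPEC =====
def Spec_process_entities (entities : List (String × String)) (out : List (String × String)) : Prop := out = process_entities_alt entities
instance (entities : List (String × String)) (out : List (String × String)) : Decidable (Spec_process_entities entities out) := by unfold Spec_process_entities; infer_instance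

-- ===== CLAIM (what is proved, stated in full; the proofs are below) =====
def Claim_equal_process_entities : Prop := ∀ (entities : List (String × String)), Dom_process_entities entities → Spec_process_entities entities (process_entities entities)

-- ===== LEMMAS AND PROOFS =====

-- replace.go with a single-char pattern and empty replacement is a filter
theorem replace_go_single (c : Char) (fuel : Nat) (l acc : List Char) (h : l.length ≤ fuel) :
    PySem.Chars.replace.go [c] [] fuel l acc = acc.reverse ++ l.filter (fun x => x ≠ c) := by
  induction fuel generalizing l acc with
  | zero =>
    have : l = [] := List.eq_nil_of_length_eq_zero (Nat.le_zero.mp h)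
    subst this
    simp [PySem.Chars.replace.go]
  | succ n ih =>
    cases l with
    | nil => simp [PySem.Chars.replace.go]
    | cons c' t =>
      simp only [PySem.Chars.replace.go]
      by_cases hc : c = c'
      · subst hc
        simp only [List.isPrefixOf, BEq.rfl, Bool.true_and, if_true]
        rw [ih _ _ (by simpa using Nat.le_of_succ_le_succ h)]
        simp
      · have hp : [c].isPrefixOf (c' :: t) = false := by
          simp [List.isPrefixOf, hc]
        rw [hp]
        simp only [Bool.false_eq_true, if_false]
        rw [ih _ _ (by simpa using Nat.le_of_succ_le_succ h)]
        simp [Ne.symm hc]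

theorem replace_single (c : Char) (s : List Char) :
    PySem.Chars.replace s [c] [] = s.filter (fun x => x ≠ c) := by
  rw [PySem.Chars.replace]
  simp only [List.isEmpty_cons, Bool.false_eq_true, if_false]
  exact replace_go_single c s.length s [] le_rfl

-- string-level version of the inner loop of A
theorem inner_loop_eq (s : String) :
    puncString.toList.foldl (fun t ch => PySem.Str.replace t (String.ofList [ch]) "") s
      = String.ofList (s.toList.filter (fun x => !puncString.toList.contains x)) := by
  have key : ∀ (punc : List Char) (s : String),
      punc.foldl (fun t ch => PySem.Str.replace t (String.ofList [ch]) "") s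
        = String.ofList (s.toList.filter (fun x => !punc.contains x)) := by
    intro punc
    induction punc with
    | nil => intro s; simp [String.ofList_toList]
    | cons c cs ih =>
      intro s
      simp only [List.foldl_cons]
      rw [ih]
      congr 1
      have h1 : (PySem.Str.replace s (String.ofList [c]) "").toList
          = PySem.Chars.replace s.toList [c] [] := by
        simp
      rw [h1, replace_single, List.filter_filter]
      apply List.filter_congr
      intro x _
      simp [Bool.and_comm]
  exact key puncString.toList s

theorem foldl_append_map (f : String × String → String × String)
    (l : List (String × String)) (acc : List (String × String)) :
    l.foldl (fun processed p => processed ++ [f p]) acc = acc ++ l.map f := by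
  induction l generalizing acc with
  | nil => simp
  | cons x xs ih => simp [List.foldl_cons, ih]

-- ===== VERDICT (by name: the statement is the Claim_ definition above) =====
theorem process_entities_spec : Claim_equal_process_entities := by
  intro entities _
  unfold Spec_process_entities process_entities process_entities_alt
  rw [foldl_append_map
    (fun p => (puncString.toList.foldl
      (fun t ch => PySem.Str.replace t (String.ofList [ch]) "") (PySem.Str.lower p.1), p.2))]
  simp only [List.nil_append]
  apply List.map_congr_left
  intro p _
  rw [inner_loop_eq]
  simp [puncSet, PySem.Set.mem_ofList]
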